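-- pv_equiv track=rewrite | github.com/makotoiiimpact/legalai-api | routes/intake.py | compute_entity_counts
-- ===== SOURCE A (Python) =====
-- def _active(candidate_rows):
--     """Drop rejected candidates — the review-flow 'not_entity' branch."""
--     return [c for c in candidate_rows if c.get("review_status") != "rejected"]
--
-- def compute_entity_counts(candidate_rows, case_row=None):
--     active = _active(candidate_rows)
--     entity_count = len(active)
--     confirmed_count = sum(
--         1 for c in active
--         if c.get("review_status") in ("confirmed", "edited")
--     )
--     ambiguous_count = sum(
--         1 for c in active
--         if (c.get("alternative_matches") or [])
--         and c.get("review_status") == "pending"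
--     )
--     # hasMatchupData aligns with the /matchup endpoint's gate: available when
--     # the case is confirmed, OR when any entity has a concrete match.
--     has_matchup = (
--         (case_row and case_row.get("review_status") == "confirmed")
--         or any(c.get("matched_entity_id") for c in active)
--     )
--     return entity_count, confirmed_count, ambiguous_count, has_matchup
-- ===== SOURCE B (Python) =====
-- def compute_entity_counts(candidate_rows, case_row=None):
--     entity_count = 0
--     confirmed_count = 0
--     ambiguous_count = 0
--     any_matched = False
--     for c in candidate_rows:
--         status = c.get("review_status")
--         if status == "rejected":
--             continue
--         entity_count += 1
--         if status in ("confirmed", "edited"):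
--             confirmed_count += 1
--         if (c.get("alternative_matches") or []) and status == "pending":
--             ambiguous_count += 1
--         any_matched = any_matched or bool(c.get("matched_entity_id"))
--     has_matchup = (case_row and case_row.get("review_status") == "confirmed") or any_matched
--     return entity_count, confirmed_count, ambiguous_count, has_matchup
-- ===== Notes on version B (the rewrite author's own statement) =====
-- stated objective: simpler
-- what changed: Replaces the intermediate active-list plus four separate scans (filter, two generator sums, an any) with one loop over candidate_rows maintaining all four accumulators.
import Mathlib
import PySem

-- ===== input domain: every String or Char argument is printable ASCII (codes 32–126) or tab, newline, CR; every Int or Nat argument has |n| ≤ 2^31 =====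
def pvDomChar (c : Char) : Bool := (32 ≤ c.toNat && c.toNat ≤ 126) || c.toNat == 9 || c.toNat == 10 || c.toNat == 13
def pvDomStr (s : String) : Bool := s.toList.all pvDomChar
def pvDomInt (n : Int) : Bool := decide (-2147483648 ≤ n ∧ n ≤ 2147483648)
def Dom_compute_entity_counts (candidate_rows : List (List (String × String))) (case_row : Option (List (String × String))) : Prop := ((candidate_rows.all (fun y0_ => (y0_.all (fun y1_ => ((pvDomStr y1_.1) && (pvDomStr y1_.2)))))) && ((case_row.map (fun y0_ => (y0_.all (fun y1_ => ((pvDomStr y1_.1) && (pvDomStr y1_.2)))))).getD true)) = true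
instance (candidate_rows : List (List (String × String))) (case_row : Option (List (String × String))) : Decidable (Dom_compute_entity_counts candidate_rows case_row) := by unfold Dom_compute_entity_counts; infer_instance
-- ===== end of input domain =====

-- B replaces A's intermediate active list and four separate scans with one loop maintaining
-- all four accumulators — same result, simpler single pass.

-- first-match lookup in an association list = dict.get(k)
def pvGet (c : List (String × String)) (k : String) : Option String := (PySem.Dict.mk c).get? k

-- truthiness of c.get(k): a present non-empty string
def pvTruthy (o : Option String) : Bool :=
  match o with
  | some s => s != ""
  | none => false

-- ===== PORT A =====
def compute_entity_counts (candidate_rows : List (List (String × String))) (case_row : Option (List (String × String))) : Int × Int × Int × Bool :=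
  let active := candidate_rows.filter (fun c => pvGet c "review_status" != some "rejected")
  let entity_count : Int := active.length
  let confirmed_count : Int :=
    ((active.filter (fun c => pvGet c "review_status" == some "confirmed" || pvGet c "review_status" == some "edited")).map (fun _ => (1 : Int))).sum
  let ambiguous_count : Int :=
    ((active.filter (fun c => pvTruthy (pvGet c "alternative_matches") && pvGet c "review_status" == some "pending")).map (fun _ => (1 : Int))).sum
  let anyMatched := active.any (fun c => pvTruthy (pvGet c "matched_entity_id"))
  -- (case_row and case_row.get(...) == "confirmed") or any(...): short-circuit, bool-valued
  let has_matchup :=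
    match case_row with
    | none => anyMatched
    | some d => if d.isEmpty then anyMatched
                else if pvGet d "review_status" == some "confirmed" then true
                else anyMatched
  (entity_count, confirmed_count, ambiguous_count, has_matchup)

-- ===== PORT B =====
def pvStepB (st : Int × Int × Int × Bool) (row : List (String × String)) : Int × Int × Int × Bool :=
  let status := pvGet row "review_status"
  if status == some "rejected" then st
  else
    (st.1 + 1,
     st.2.1 + (if status == some "confirmed" || status == some "edited" then 1 else 0),
     st.2.2.1 + (if pvTruthy (pvGet row "alternative_matches") && status == some "pending" then 1 else 0),
     st.2.2.2 || pvTruthy (pvGet row "matched_entity_id"))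

def compute_entity_counts_alt (candidate_rows : List (List (String × String))) (case_row : Option (List (String × String))) : Int × Int × Int × Bool :=
  let st := candidate_rows.foldl pvStepB (0, 0, 0, false)
  let has_matchup :=
    match case_row with
    | none => st.2.2.2
    | some d => if d.isEmpty then st.2.2.2
                else if pvGet d "review_status" == some "confirmed" then true
                else st.2.2.2
  (st.1, st.2.1, st.2.2.1, has_matchup)

-- ===== PRECONDITION & SPEC =====
def Spec_compute_entity_counts (candidate_rows : List (List (String × String))) (case_row : Option (List (String × String))) (out : Int × Int × Int × Bool) : Prop := out = compute_entity_counts_alt candidate_rows case_row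
instance (candidate_rows : List (List (String × String))) (case_row : Option (List (String × String))) (out : Int × Int × Int × Bool) : Decidable (Spec_compute_entity_counts candidate_rows case_row out) := by unfold Spec_compute_entity_counts; infer_instance

-- ===== CLAIM (what is proved, stated in full; the proofs are below) =====
def Claim_equal_compute_entity_counts : Prop := ∀ (candidate_rows : List (List (String × String))) (case_row : Option (List (String × String))), Dom_compute_entity_counts candidate_rows case_row → Spec_compute_entity_counts candidate_rows case_row (compute_entity_counts candidate_rows case_row)

-- ===== LEMMAS AND PROOFS =====

lemma pvFold_eq (rows : List (List (String × String))) (e c a : Int) (m : Bool) :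
    rows.foldl pvStepB (e, c, a, m) =
      (e + ((rows.filter (fun r => pvGet r "review_status" != some "rejected")).length : Int),
       c + (((rows.filter (fun r => pvGet r "review_status" != some "rejected")).filter (fun r => pvGet r "review_status" == some "confirmed" || pvGet r "review_status" == some "edited")).map (fun _ => (1 : Int))).sum,
       a + (((rows.filter (fun r => pvGet r "review_status" != some "rejected")).filter (fun r => pvTruthy (pvGet r "alternative_matches") && pvGet r "review_status" == some "pending")).map (fun _ => (1 : Int))).sum,
       m || (rows.filter (fun r => pvGet r "review_status" != some "rejected")).any (fun r => pvTruthy (pvGet r "matched_entity_id"))) := by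
  induction rows generalizing e c a m with
  | nil => simp
  | cons r rs ih =>
    simp only [List.foldl_cons, List.filter_cons]
    by_cases h : pvGet r "review_status" = some "rejected"
    · simp [pvStepB, h, ih]
    · have hne : (pvGet r "review_status" != some "rejected") = true := by
        simp [h]
      simp only [hne, if_pos, List.filter_cons]
      rw [pvStepB, if_neg (by simp [h])]
      rw [ih]
      by_cases h1 : (pvGet r "review_status" == some "confirmed" || pvGet r "review_status" == some "edited") = true <;>
      by_cases h2 : (pvTruthy (pvGet r "alternative_matches") && pvGet r "review_status" == some "pending") = true <;>
        simp [h1, h2] <;> constructor <;> try ring_nf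
      all_goals simp [Bool.or_assoc]

-- ===== VERDICT (by name: the statement is the Claim_ definition above) =====
theorem compute_entity_counts_spec : Claim_equal_compute_entity_counts := by
  intro rows case_row _
  unfold Spec_compute_entity_counts compute_entity_counts compute_entity_counts_alt
  rw [pvFold_eq]
  simp
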